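-- pv_equiv track=rewrite | github.com/devSaifur/python-101 | loops/04/main.py | calculate_flurry_crit
-- ===== SOURCE A (Python) =====
-- def calculate_flurry_crit(num_attacks, base_damage):
--     total_damage = base_damage * 2
--     last_attack = num_attacks
--
--     for attack in range(0, num_attacks):
--         if attack != last_attack:
--             total_damage += base_damage * 2
--         else:
--             total_damage += base_damage * 4
--
--     return total_damage
-- ===== SOURCE B (Python) =====
-- def calculate_flurry_crit(num_attacks, base_damage):
--     # The attack counter never reaches num_attacks inside range(0, num_attacks),
--     # so every iteration adds base_damage * 2; closed form.
--     return base_damage * 2 * (max(num_attacks, 0) + 1)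
-- ===== Notes on version B (the rewrite author's own statement) =====
-- stated objective: faster
-- what changed: Replaced the O(n) accumulation loop (whose crit branch is dead code, since attack < num_attacks always) by the closed form base_damage*2*(max(num_attacks,0)+1).
import Mathlib
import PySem

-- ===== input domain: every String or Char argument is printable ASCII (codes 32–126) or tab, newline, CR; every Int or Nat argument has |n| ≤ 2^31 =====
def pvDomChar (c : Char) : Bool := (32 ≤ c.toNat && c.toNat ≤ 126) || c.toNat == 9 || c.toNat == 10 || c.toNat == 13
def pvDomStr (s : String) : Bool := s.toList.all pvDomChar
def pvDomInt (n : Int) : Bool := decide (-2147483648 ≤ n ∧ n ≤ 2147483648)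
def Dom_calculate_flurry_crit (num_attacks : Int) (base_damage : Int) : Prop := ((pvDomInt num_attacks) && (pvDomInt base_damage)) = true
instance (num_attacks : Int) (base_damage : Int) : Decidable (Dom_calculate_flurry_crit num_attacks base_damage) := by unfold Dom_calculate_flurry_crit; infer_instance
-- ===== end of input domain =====

-- B replaces A's O(n) loop (whose crit branch never fires) by the closed form 2*b*(max(n,0)+1); objective: faster.


-- ===== PORT A =====
def calculate_flurry_crit (num_attacks : Int) (base_damage : Int) : Int :=
  let total_damage := base_damage * 2
  let last_attack := num_attacks
  (PySem.List.pyRange 0 num_attacks 1).foldl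
    (fun total_damage attack =>
      if attack ≠ last_attack then total_damage + base_damage * 2
      else total_damage + base_damage * 4)
    total_damage

-- ===== PORT B =====
def calculate_flurry_crit_alt (num_attacks : Int) (base_damage : Int) : Int :=
  base_damage * 2 * (max num_attacks 0 + 1)

-- ===== PRECONDITION & SPEC =====
def Spec_calculate_flurry_crit (num_attacks : Int) (base_damage : Int) (out : Int) : Prop := out = calculate_flurry_crit_alt num_attacks base_damage
instance (num_attacks : Int) (base_damage : Int) (out : Int) : Decidable (Spec_calculate_flurry_crit num_attacks base_damage out) := by unfold Spec_calculate_flurry_crit; infer_instance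

-- ===== CLAIM (what is proved, stated in full; the proofs are below) =====
def Claim_equal_calculate_flurry_crit : Prop := ∀ (num_attacks : Int) (base_damage : Int), Dom_calculate_flurry_crit num_attacks base_damage → Spec_calculate_flurry_crit num_attacks base_damage (calculate_flurry_crit num_attacks base_damage)

-- ===== LEMMAS AND PROOFS =====

-- A's loop over range(0, n): every element satisfies attack < n, so the crit branch is dead
-- and the loop adds b*2 once per element; generalize over the accumulator.
theorem flurry_foldl_elems (n b : Int) (l : List Int) (hl : ∀ x ∈ l, x ≠ n) (acc : Int) :
    l.foldl (fun t a => if a ≠ n then t + b * 2 else t + b * 4) acc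
      = acc + b * 2 * l.length := by
  induction l generalizing acc with
  | nil => simp
  | cons x xs ih =>
    have hx : x ≠ n := hl x (List.mem_cons_self ..)
    simp only [List.foldl_cons, if_pos hx, List.length_cons]
    rw [ih (fun y hy => hl y (List.mem_cons_of_mem _ hy))]
    push_cast
    ring

theorem pyRange_len (n : Int) : ((PySem.List.pyRange 0 n 1).length : Int) = max n 0 := by
  rw [PySem.List.length_pyRange_one]
  omega

-- ===== VERDICT (by name: the statement is the Claim_ definition above) =====
theorem calculate_flurry_crit_spec : Claim_equal_calculate_flurry_crit := by
  intro n b _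
  unfold Spec_calculate_flurry_crit calculate_flurry_crit calculate_flurry_crit_alt
  have hmem : ∀ x ∈ PySem.List.pyRange 0 n 1, x ≠ n := by
    intro x hx
    have := PySem.List.mem_pyRange_one.mp hx
    omega
  rw [flurry_foldl_elems n b _ hmem, pyRange_len]
  ring
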